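-- pv_equiv track=rewrite | github.com/sofiekalthof/BehavioralEquivalences | alpha.py | alpha_b
-- ===== SOURCE A (Python) =====
-- def alpha_b(cartesian_product, set_of_sets):
--     """
--     Berechnet die Funktion alpha für den Fall der Bisimularität.
--
--     :param cartesian_product: das kartesische Produkt der Menge der Zustände mit sich selbst
--     :param set_of_sets: eine Menge von Mengen
--     :return: eine Äquivalenzrelation, deren Elemente die Bedingung von alpha erfüllen
--     """
--     relation = []
--     for tupel in cartesian_product:
--         counter = 0
--         for set_x in set_of_sets:
--             if ((tupel[0] in set_x) & (tupel[1] not in set_x)) | ((tupel[0] not in set_x) & (tupel[1] in set_x)):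
--                 break
--             counter += 1
--             if counter == len(set_of_sets):
--                 relation.append(tupel)
--     return relation
-- ===== SOURCE B (Python) =====
-- def alpha_b(cartesian_product, set_of_sets):
--     # Memoise a membership signature per distinct element in a dict;
--     # a pair qualifies iff both components have equal signatures.
--     if not set_of_sets:
--         return []
--     sig = {}
--     def signature(x):
--         if x not in sig:
--             sig[x] = [x in s for s in set_of_sets]
--         return sig[x]
--     return [t for t in cartesian_product if signature(t[0]) == signature(t[1])]
-- ===== Notes on version B (the rewrite author's own statement) =====
-- stated objective: alternative
-- what changed: Instead of re-scanning every set for every pair with a break/counter loop, B memoises a membership-signature list per distinct element in a dict built on first use and keeps a pair iff the two signatures are equal (empty set list kept as the empty relation, as in A); it trades A's early-exit scan for one signature computation per distinct element.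
import Mathlib
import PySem

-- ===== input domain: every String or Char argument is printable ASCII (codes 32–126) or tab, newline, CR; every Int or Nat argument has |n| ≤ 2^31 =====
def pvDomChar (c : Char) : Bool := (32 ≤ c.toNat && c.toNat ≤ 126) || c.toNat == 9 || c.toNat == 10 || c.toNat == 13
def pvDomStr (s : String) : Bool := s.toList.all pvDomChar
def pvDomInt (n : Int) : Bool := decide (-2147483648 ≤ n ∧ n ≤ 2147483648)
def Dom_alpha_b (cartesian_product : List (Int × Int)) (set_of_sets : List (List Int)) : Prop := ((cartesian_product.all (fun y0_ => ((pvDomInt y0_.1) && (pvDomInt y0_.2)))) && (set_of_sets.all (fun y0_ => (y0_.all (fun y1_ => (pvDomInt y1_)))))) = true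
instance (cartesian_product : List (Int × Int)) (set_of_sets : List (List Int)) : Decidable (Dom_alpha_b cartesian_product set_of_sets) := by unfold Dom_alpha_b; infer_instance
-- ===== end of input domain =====

-- B memoises a membership-signature list per distinct element in a dict and keeps a pair iff the two signatures are equal (alternative algorithm; same return value).


-- ===== PORT A =====
-- inner 'for set_x in set_of_sets' loop: carries the running counter and whether
-- tupel was appended; a membership mismatch is Python's break (returns the flag)
def alphaInnerA (tupel : Int × Int) (total : Nat) :
    List (List Int) → Nat → Bool → Bool
  | [], _, appended => appended
  | set_x :: rest, counter, appended =>
    if (set_x.contains tupel.1 && !(set_x.contains tupel.2)) ||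
       (!(set_x.contains tupel.1) && set_x.contains tupel.2) then appended
    else alphaInnerA tupel total rest (counter + 1) (appended || (counter + 1 == total))

def alpha_b (cartesian_product : List (Int × Int)) (set_of_sets : List (List Int)) : List (Int × Int) :=
  cartesian_product.foldl
    (fun relation tupel =>
      if alphaInnerA tupel set_of_sets.length set_of_sets 0 false
      then relation ++ [tupel] else relation)
    []

-- ===== PORT B =====
-- signature of x: the list [x in s for s in set_of_sets]
def sigOf (set_of_sets : List (List Int)) (x : Int) : List Bool :=
  set_of_sets.map (fun s => s.contains x)

-- B's filtering pass, threading the memo dict 'sig' through the loop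
def alpha_b_alt (cartesian_product : List (Int × Int)) (set_of_sets : List (List Int)) : List (Int × Int) :=
  if set_of_sets.isEmpty then []
  else
    (cartesian_product.foldl
      (fun (st : PySem.Dict Int (List Bool) × List (Int × Int)) t =>
        let d := st.1.setdefault t.1 (sigOf set_of_sets t.1)
        let d := d.setdefault t.2 (sigOf set_of_sets t.2)
        (d, if d.getD t.1 [] == d.getD t.2 [] then st.2 ++ [t] else st.2))
      (PySem.Dict.empty, [])).2

-- ===== PRECONDITION & SPEC =====
def Spec_alpha_b (cartesian_product : List (Int × Int)) (set_of_sets : List (List Int)) (out : List (Int × Int)) : Prop := out = alpha_b_alt cartesian_product set_of_sets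
instance (cartesian_product : List (Int × Int)) (set_of_sets : List (List Int)) (out : List (Int × Int)) : Decidable (Spec_alpha_b cartesian_product set_of_sets out) := by unfold Spec_alpha_b; infer_instance

-- ===== CLAIM (what is proved, stated in full; the proofs are below) =====
def Claim_equal_alpha_b : Prop := ∀ (cartesian_product : List (Int × Int)) (set_of_sets : List (List Int)), Dom_alpha_b cartesian_product set_of_sets → Spec_alpha_b cartesian_product set_of_sets (alpha_b cartesian_product set_of_sets)

-- ===== LEMMAS AND PROOFS =====

-- characterisation of A's inner loop
lemma alphaInnerA_eq (t : Int × Int) (total : Nat) :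
    ∀ (rest : List (List Int)) (counter : Nat) (app : Bool),
      counter + rest.length = total →
      alphaInnerA t total rest counter app =
        (app || (!rest.isEmpty && rest.all (fun s => s.contains t.1 == s.contains t.2))) := by
  intro rest
  induction rest with
  | nil => intro counter app _; simp [alphaInnerA]
  | cons s tl ih =>
    intro counter app h
    simp only [alphaInnerA]
    by_cases hm : ((s.contains t.1 && !(s.contains t.2)) ||
        (!(s.contains t.1) && s.contains t.2)) = true
    · rw [if_pos hm]
      have hne : (s.contains t.1 == s.contains t.2) = false := by
        cases h1 : s.contains t.1 <;> cases h2 : s.contains t.2 <;> simp_all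
      simp only [List.all_cons, hne, Bool.false_and, Bool.and_false, Bool.or_false]
    · rw [if_neg hm]
      have heq : (s.contains t.1 == s.contains t.2) = true := by
        cases h1 : s.contains t.1 <;> cases h2 : s.contains t.2 <;> simp_all
      rw [ih (counter + 1) _ (by simp at h ⊢; omega)]
      rcases tl with _ | ⟨s', tl'⟩
      · have htot : (counter + 1 == total) = true := by
          simp only [List.length_cons, List.length_nil, Nat.zero_add] at h
          simp [h]
        simp only [htot, Bool.or_true, List.isEmpty_nil, Bool.not_true, Bool.or_false,
          List.isEmpty_cons, Bool.not_false, List.all_cons, List.all_nil, heq, Bool.and_true]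
      · have htot : (counter + 1 == total) = false := by
          simp only [List.length_cons] at h; simp; omega
        simp only [htot, Bool.or_false, List.isEmpty_cons, Bool.not_false,
          Bool.true_and, List.all_cons, heq]

-- the memo-dict invariant: every stored value is the signature of its key
def SigInv (sets : List (List Int)) (d : PySem.Dict Int (List Bool)) : Prop :=
  ∀ k v, d.get? k = some v → v = sigOf sets k

lemma sigInv_setdefault {sets : List (List Int)} {d : PySem.Dict Int (List Bool)}
    (hd : SigInv sets d) (x : Int) :
    SigInv sets (d.setdefault x (sigOf sets x)) := by
  intro k v hv
  by_cases hc : d.contains x = true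
  · rw [PySem.Dict.setdefault_of_contains d _ hc] at hv; exact hd k v hv
  · rw [PySem.Dict.setdefault_of_not_contains d _ (by simpa using hc)] at hv
    by_cases hk : k = x
    · subst hk
      rw [PySem.Dict.get?_insert_self] at hv
      exact (Option.some.inj hv).symm
    · rw [PySem.Dict.get?_insert_of_ne d _ hk] at hv
      exact hd k v hv

lemma getD_setdefault_sig {sets : List (List Int)} {d : PySem.Dict Int (List Bool)}
    (hd : SigInv sets d) (x : Int) :
    (d.setdefault x (sigOf sets x)).getD x [] = sigOf sets x := by
  rw [PySem.Dict.getD_eq_get?_getD, PySem.Dict.get?_setdefault_self]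
  cases hg : d.get? x with
  | none => simp
  | some v => simp [hd x v hg]

-- per-pair condition equality: A's inner loop decides signature equality (nonempty sets)
lemma inner_eq_sig (t : Int × Int) (sets : List (List Int)) (hne : sets.isEmpty = false) :
    alphaInnerA t sets.length sets 0 false = (sigOf sets t.1 == sigOf sets t.2) := by
  rw [alphaInnerA_eq t sets.length sets 0 false (by simp)]
  simp only [Bool.false_or, hne, Bool.not_false, Bool.true_and]
  rcases h : (sigOf sets t.1 == sigOf sets t.2) with _ | _
  · simp only [beq_eq_false_iff_ne, ne_eq, sigOf, List.map_eq_map_iff] at h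
    push Not at h
    obtain ⟨s, hs, hss⟩ := h
    simp only [List.all_eq_false]
    exact ⟨s, hs, by rw [beq_eq_false_iff_ne.mpr hss]; exact Bool.false_ne_true⟩
  · simp only [beq_iff_eq, sigOf, List.map_eq_map_iff] at h
    simp only [List.all_eq_true]
    intro s hs
    simp only [beq_iff_eq]
    exact h s hs

-- fold equivalence generalised over the accumulator and any invariant-respecting dict
lemma fold_eq (sets : List (List Int)) (hne : sets.isEmpty = false) :
    ∀ (cp : List (Int × Int)) (rel : List (Int × Int)) (d : PySem.Dict Int (List Bool)),
      SigInv sets d →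
      cp.foldl
        (fun relation tupel =>
          if alphaInnerA tupel sets.length sets 0 false
          then relation ++ [tupel] else relation) rel =
      (cp.foldl
        (fun (st : PySem.Dict Int (List Bool) × List (Int × Int)) t =>
          let d := st.1.setdefault t.1 (sigOf sets t.1)
          let d := d.setdefault t.2 (sigOf sets t.2)
          (d, if d.getD t.1 [] == d.getD t.2 [] then st.2 ++ [t] else st.2))
        (d, rel)).2 := by
  intro cp
  induction cp with
  | nil => intro rel d _; rfl
  | cons t tl ih =>
    intro rel d hd
    have hd1 : SigInv sets (d.setdefault t.1 (sigOf sets t.1)) :=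
      sigInv_setdefault hd t.1
    have hd2 : SigInv sets ((d.setdefault t.1 (sigOf sets t.1)).setdefault t.2 (sigOf sets t.2)) :=
      sigInv_setdefault hd1 t.2
    have h2 : ((d.setdefault t.1 (sigOf sets t.1)).setdefault t.2 (sigOf sets t.2)).getD t.2 []
        = sigOf sets t.2 := getD_setdefault_sig hd1 t.2
    have h1 : ((d.setdefault t.1 (sigOf sets t.1)).setdefault t.2 (sigOf sets t.2)).getD t.1 []
        = sigOf sets t.1 := by
      by_cases hxy : t.1 = t.2
      · rw [hxy]; exact getD_setdefault_sig (sigInv_setdefault hd t.2) t.2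
      · by_cases hc : (d.setdefault t.1 (sigOf sets t.1)).contains t.2 = true
        · rw [PySem.Dict.setdefault_of_contains _ _ hc]
          exact getD_setdefault_sig hd t.1
        · rw [PySem.Dict.setdefault_of_not_contains _ _ (by simpa using hc),
            PySem.Dict.getD_insert_of_ne _ _ _ hxy]
          exact getD_setdefault_sig hd t.1
    simp only [List.foldl_cons, inner_eq_sig t sets hne, h1, h2]
    exact ih _ _ hd2

-- when set_of_sets is empty, A never appends (counter never reaches len = 0 inside the loop)
lemma alpha_b_empty_sets : ∀ (cp : List (Int × Int)), alpha_b cp [] = [] := by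
  intro cp
  unfold alpha_b
  induction cp with
  | nil => rfl
  | cons t tl ih => simp [alphaInnerA]

-- ===== VERDICT (by name: the statement is the Claim_ definition above) =====
theorem alpha_b_spec : Claim_equal_alpha_b := by
  intro cp sets _
  unfold Spec_alpha_b
  by_cases hne : sets.isEmpty = true
  · have hsets : sets = [] := by simpa [List.isEmpty_iff] using hne
    subst hsets
    rw [alpha_b_empty_sets cp]
    rfl
  · unfold alpha_b alpha_b_alt
    rw [if_neg hne]
    exact fold_eq sets (by simpa using hne) cp [] PySem.Dict.empty
      (fun k v hv => by simp [PySem.Dict.get?_empty] at hv)
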